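-- pv_equiv track=rewrite | github.com/aiyer-commits/project_euler_solutions | eleven.py | solution
-- ===== SOURCE A (Python) =====
-- from math import prod
--
-- def get_transformations(n):
--     pos = range(1, n + 1)
--     neg = range(-1, -n - 1, -1)
--     zer = [0] * n
--     dirs = [pos, neg, zer]
--     t = []
--     for d1 in dirs:
--         for d2 in dirs:
--             t.append(list(zip(d1, d2)))
--     t.pop()  # delete zer,zer
--     return t
--
-- def solution(grid, d):
--     height = len(grid)
--     width = len(grid[0])
--     transformations = get_transformations(d)
--
--     def point_in_bounds(r, c):
--         return 0 < r < height and 0 < c < width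
--
--     def in_bounds(line):
--         return all([point_in_bounds(r, c) for (r, c) in line])
--
--     def transform(r, c, direction):
--         return [(r + dx, c + dy) for (dx, dy) in direction]
--
--     def lines(r, c):
--         return [
--             transform(r, c, direction)
--             for direction in transformations
--             if in_bounds(transform(r, c, direction))
--         ]
--
--     def values(line):
--         return [grid[r][c] for (r, c) in line]
--
--     max_prod = 1
--
--     for r in range(height):
--         for c in range(width):
--             for line in lines(r, c):
--                 prodd = prod(values(line)) * grid[r][c]
--                 max_prod = prodd if prodd > max_prod else max_prod
--
--     return max_prod
-- ===== SOURCE B (Python) =====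
-- def solution(grid, d):
--     height = len(grid)
--     width = len(grid[0])
--     dirs = ((1, 1), (1, -1), (1, 0), (-1, 1), (-1, -1), (-1, 0), (0, 1), (0, -1))
--     best = 1
--     for r in range(height):
--         for c in range(width):
--             start = grid[r][c]
--             for dx, dy in dirs:
--                 p = start
--                 rr, cc = r, c
--                 ok = True
--                 for _ in range(d):
--                     rr += dx
--                     cc += dy
--                     if not (0 < rr < height and 0 < cc < width):
--                         ok = False
--                         break
--                     p *= grid[rr][cc]
--                 if ok and p > best:
--                     best = p
--     return best
-- ===== Notes on version B (the rewrite author's own statement) =====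
-- stated objective: faster
-- what changed: B replaces A's materialised coordinate machinery (zip-of-ranges offset lists, transform/filter/map line candidates, value lists, math.prod) by a direct early-exit walk: for each cell and each of the 8 unit directions it steps up to d times, multiplying cells and aborting as soon as a step leaves the interior, so no intermediate lists are built and walks stop at the border. …
-- outside the precondition, e.g. on solution([[-2], [2], [3, 7], [6], [], [9]], 1): A returns 1, B raises IndexError
import Mathlib
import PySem

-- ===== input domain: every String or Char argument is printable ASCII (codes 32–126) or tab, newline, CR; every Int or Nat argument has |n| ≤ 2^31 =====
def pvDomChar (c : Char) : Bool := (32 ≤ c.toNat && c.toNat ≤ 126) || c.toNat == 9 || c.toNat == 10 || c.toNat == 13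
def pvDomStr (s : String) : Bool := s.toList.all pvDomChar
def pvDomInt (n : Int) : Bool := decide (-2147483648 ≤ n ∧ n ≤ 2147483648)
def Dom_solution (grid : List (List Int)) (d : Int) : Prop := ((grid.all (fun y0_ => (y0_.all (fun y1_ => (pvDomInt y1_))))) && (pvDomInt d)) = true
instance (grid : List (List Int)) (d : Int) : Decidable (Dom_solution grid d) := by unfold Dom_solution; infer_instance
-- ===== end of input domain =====

-- B replaces A's materialised offset/line/value lists by a direct early-exit walk per cell and
-- unit direction (no intermediate lists, walks abort at the border; measured faster); values proved equal.

-- ===== PORT A =====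
-- grid[r][c]; the getD defaults are only reachable outside Pre_solution
def cellAt (grid : List (List Int)) (r c : Int) : Int :=
  (PySem.List.pyGet? ((PySem.List.pyGet? grid r).getD []) c).getD 0

-- get_transformations(n)
def getTransformations (n : Int) : List (List (Int × Int)) :=
  let pos := PySem.List.pyRange 1 (n + 1) 1
  let neg := PySem.List.pyRange (-1) (-n - 1) (-1)
  let zer : List Int := List.replicate n.toNat 0     -- [0] * n  (empty for n ≤ 0, as in Python)
  let dirs := [pos, neg, zer]
  let t := dirs.flatMap (fun d1 => dirs.map (fun d2 => d1.zip d2))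
  t.dropLast                                         -- t.pop(): delete zer,zer

def pointInBoundsA (height width r c : Int) : Bool :=
  decide (0 < r ∧ r < height ∧ 0 < c ∧ c < width)

def inBoundsA (height width : Int) (line : List (Int × Int)) : Bool :=
  line.all (fun rc => pointInBoundsA height width rc.1 rc.2)

def transformA (r c : Int) (direction : List (Int × Int)) : List (Int × Int) :=
  direction.map (fun dxy => (r + dxy.1, c + dxy.2))

def linesA (ts : List (List (Int × Int))) (height width r c : Int) : List (List (Int × Int)) :=
  (ts.filter (fun dir => inBoundsA height width (transformA r c dir))).map (transformA r c)

def valuesA (grid : List (List Int)) (line : List (Int × Int)) : List Int :=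
  line.map (fun rc => cellAt grid rc.1 rc.2)

def solution (grid : List (List Int)) (d : Int) : Int :=
  let height : Int := grid.length
  let width : Int := ((PySem.List.pyGet? grid 0).getD []).length
  let ts := getTransformations d
  (PySem.List.pyRange 0 height 1).foldl (fun m r =>
    (PySem.List.pyRange 0 width 1).foldl (fun m c =>
      (linesA ts height width r c).foldl (fun m line =>
        let prodd := (valuesA grid line).prod * cellAt grid r c
        if prodd > m then prodd else m) m) m) 1

-- ===== PORT B =====
-- the inner 'for _ in range(d)' loop of Source B: step, check, multiply; none = aborted
def walkB (grid : List (List Int)) (height width dx dy : Int) :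
    Nat → Int → Int → Int → Option Int
  | 0, _, _, p => some p
  | Nat.succ k, rr, cc, p =>
      let rr' := rr + dx
      let cc' := cc + dy
      if 0 < rr' ∧ rr' < height ∧ 0 < cc' ∧ cc' < width then
        walkB grid height width dx dy k rr' cc' (p * cellAt grid rr' cc')
      else none

def dirsB : List (Int × Int) :=
  [(1, 1), (1, -1), (1, 0), (-1, 1), (-1, -1), (-1, 0), (0, 1), (0, -1)]

def solution_alt (grid : List (List Int)) (d : Int) : Int :=
  let height : Int := grid.length
  let width : Int := ((PySem.List.pyGet? grid 0).getD []).length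
  (PySem.List.pyRange 0 height 1).foldl (fun m r =>
    (PySem.List.pyRange 0 width 1).foldl (fun m c =>
      dirsB.foldl (fun m dxy =>
        match walkB grid height width dxy.1 dxy.2 d.toNat r c (cellAt grid r c) with
        | some p => if p > m then p else m
        | none => m) m) m) 1

-- ===== PRECONDITION & SPEC =====
-- Pre_ excludes the empty grid (grid[0] raises) and ragged grids with a row shorter than the
-- first row: A usually raises IndexError there, and where it happens to return (no in-bounds
-- line forces the short-row access) B's unconditional read of each start cell raises instead.
def Pre_solution (grid : List (List Int)) (d : Int) : Prop :=
  grid ≠ [] ∧ ∀ row ∈ grid, (grid.headD []).length ≤ row.length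

instance (grid : List (List Int)) (d : Int) : Decidable (Pre_solution grid d) := by
  unfold Pre_solution; infer_instance

def pvWitness_solution : List (List Int) × Int := ([[1, 2, 3], [4, 5, 6], [7, 8, 9]], 1)

def Spec_solution (grid : List (List Int)) (d : Int) (out : Int) : Prop := out = solution_alt grid d
instance (grid : List (List Int)) (d : Int) (out : Int) : Decidable (Spec_solution grid d out) := by unfold Spec_solution; infer_instance

-- ===== CLAIM (what is proved, stated in full; the proofs are below) =====
def Claim_equal_solution : Prop := ∀ (grid : List (List Int)) (d : Int), Dom_solution grid d → Pre_solution grid d → Spec_solution grid d (solution grid d)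

-- ===== LEMMAS AND PROOFS =====

-- the offsets 1..n steps in direction (dx, dy)
def offsN (dx dy : Int) (n : Nat) : List (Int × Int) :=
  (List.range n).map (fun (k : Nat) => (((k : Int) + 1) * dx, ((k : Int) + 1) * dy))

theorem offsN_succ (dx dy : Int) (n : Nat) :
    offsN dx dy (n + 1) = (dx, dy) :: (offsN dx dy n).map (fun ab => (ab.1 + dx, ab.2 + dy)) := by
  simp only [offsN, List.range_succ_eq_map, List.map_cons, List.map_map, List.cons.injEq]
  constructor
  · norm_num
  · apply List.map_congr_left
    intro k _
    simp only [Function.comp, Prod.mk.injEq]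
    constructor <;> push_cast <;> ring

theorem transformA_shift (r c dx dy : Int) (l : List (Int × Int)) :
    transformA r c (l.map (fun ab => (ab.1 + dx, ab.2 + dy))) = transformA (r + dx) (c + dy) l := by
  simp only [transformA, List.map_map]
  apply List.map_congr_left
  intro ab _
  simp only [Function.comp, Prod.mk.injEq]
  constructor <;> ring

theorem walk_spec (grid : List (List Int)) (h w dx dy : Int) :
    ∀ (n : Nat) (r c p : Int),
      walkB grid h w dx dy n r c p =
        if inBoundsA h w (transformA r c (offsN dx dy n))
        then some (p * (valuesA grid (transformA r c (offsN dx dy n))).prod)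
        else none := by
  intro n
  induction n with
  | zero => intro r c p; simp [walkB, offsN, transformA, inBoundsA, valuesA]
  | succ k ih =>
      intro r c p
      rw [offsN_succ]
      simp only [transformA, List.map_cons]
      rw [show (List.map (fun dxy => (r + dxy.1, c + dxy.2))
            ((offsN dx dy k).map (fun ab => (ab.1 + dx, ab.2 + dy)))
          = transformA (r + dx) (c + dy) (offsN dx dy k)) from transformA_shift r c dx dy _]
      by_cases hb : 0 < r + dx ∧ r + dx < h ∧ 0 < c + dy ∧ c + dy < w
      · rw [show walkB grid h w dx dy (k + 1) r c p
              = walkB grid h w dx dy k (r + dx) (c + dy) (p * cellAt grid (r + dx) (c + dy)) from by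
            simp [walkB, hb]]
        rw [ih]
        simp only [inBoundsA, valuesA, List.all_cons, List.map_cons, List.prod_cons,
          pointInBoundsA, hb, and_self, decide_true, Bool.true_and]
        split_ifs <;> first | rfl | rw [mul_assoc]
      · have : walkB grid h w dx dy (k + 1) r c p = none := by simp [walkB, hb]
        rw [this]
        simp [inBoundsA, pointInBoundsA, hb]

theorem fold_dirs (grid : List (List Int)) (h w : Int) (N : Nat) (r c : Int) :
    ∀ (ds : List (Int × Int)) (m : Int),
      ds.foldl (fun m dxy =>
          match walkB grid h w dxy.1 dxy.2 N r c (cellAt grid r c) with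
          | some p => if p > m then p else m
          | none => m) m
      = (linesA (ds.map (fun dxy => offsN dxy.1 dxy.2 N)) h w r c).foldl
          (fun m line =>
            let prodd := (valuesA grid line).prod * cellAt grid r c
            if prodd > m then prodd else m) m := by
  intro ds
  induction ds with
  | nil => intro m; simp [linesA]
  | cons dxy rest ih =>
      intro m
      simp only [List.foldl_cons, List.map_cons, linesA, List.filter_cons]
      rw [walk_spec]
      by_cases hb : inBoundsA h w (transformA r c (offsN dxy.1 dxy.2 N)) = true
      · simp only [hb, if_true]
        rw [ih]
        simp only [linesA, List.map_cons, List.foldl_cons]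
        rw [mul_comm (cellAt grid r c) _]
      · simp only [Bool.not_eq_true] at hb
        simp only [hb, if_false, Bool.false_eq_true]
        rw [ih]
        simp [linesA]

theorem trans_eq (d : Int) :
    getTransformations d = dirsB.map (fun dxy => offsN dxy.1 dxy.2 d.toNat) := by
  have h1 : d + 1 - 1 = d := by ring
  have h2 : -1 - (-d - 1) = d := by ring
  have hpos : PySem.List.pyRange 1 (d + 1) 1
      = (List.range d.toNat).map (fun (k : Nat) => 1 + (k : Int)) := by
    rw [PySem.List.pyRange_one, h1]
  have hneg : PySem.List.pyRange (-1) (-d - 1) (-1)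
      = (List.range d.toNat).map (fun (k : Nat) => -1 - (k : Int)) := by
    rw [PySem.List.pyRange_neg_one, h2]
  have hzer : (List.replicate d.toNat (0 : Int))
      = (List.range d.toNat).map (fun (_ : Nat) => (0 : Int)) := by
    simp
  simp only [getTransformations, hpos, hneg, hzer, dirsB, List.flatMap_cons, List.flatMap_nil,
    List.map_cons, List.map_nil, List.append_nil, List.zip_map', List.cons_append,
    List.nil_append, List.dropLast_cons₂, List.dropLast_singleton, List.cons.injEq, offsN,
    and_true]
  refine ⟨?_, ?_, ?_, ?_, ?_, ?_, ?_, ?_⟩ <;>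
    · apply List.map_congr_left
      intro k _
      simp only [Prod.mk.injEq]
      constructor <;> ring

theorem A_eq_B (grid : List (List Int)) (d : Int) : solution grid d = solution_alt grid d := by
  simp only [solution, solution_alt]
  congr 1
  funext m r
  congr 1
  funext m c
  rw [trans_eq, ← fold_dirs]

-- ===== VERDICT (by name: the statement is the Claim_ definition above) =====
theorem solution_spec : Claim_equal_solution := by
  intro grid d _ _
  unfold Spec_solution
  exact A_eq_B grid d
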